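-- pv_equiv track=rewrite | github.com/evendeeperlearner/AI-Frame-Extraction | src/core/dynamic_sampler.py | _interpolate_regions
-- ===== SOURCE A (Python) =====
-- from typing import Dict, List, Tuple, Optional
--
-- def _interpolate_regions(region_map: Dict[int, str], max_frame: int) -> Dict[int, str]:
--     """
--     Interpolate region types for all frames based on analyzed samples.
--     """
--     if not region_map:
--         return {}
--
--     all_frames_map = {}
--     analyzed_frames = sorted(region_map.keys())
--
--     for frame_idx in range(max_frame + 1):
--         # Find nearest analyzed frames
--         region_type = "poor"  # Default
--
--         for analyzed_frame in analyzed_frames: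
--             if analyzed_frame <= frame_idx:
--                 region_type = region_map[analyzed_frame]
--             else:
--                 break
--
--         all_frames_map[frame_idx] = region_type
--
--     return all_frames_map
-- ===== SOURCE B (Python) =====
-- def _interpolate_regions(region_map, max_frame):
--     """Single pass: fill each segment between consecutive analyzed frames."""
--     if not region_map:
--         return {}
--     result = {}
--     start = 0
--     label = "poor"
--     for k in sorted(region_map):
--         if k > max_frame:
--             break
--         for f in range(start, k):
--             result[f] = label
--         start = max(k, 0)
--         label = region_map[k]
--     for f in range(start, max_frame + 1):
--         result[f] = label
--     return result
-- ===== Notes on version B (the rewrite author's own statement) =====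
-- stated objective: faster
-- what changed: Instead of rescanning the sorted analyzed frames for every frame index, B makes one pass over the sorted analyzed frames and fills each contiguous segment of frames between consecutive analyzed frames with its label.
import Mathlib
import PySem

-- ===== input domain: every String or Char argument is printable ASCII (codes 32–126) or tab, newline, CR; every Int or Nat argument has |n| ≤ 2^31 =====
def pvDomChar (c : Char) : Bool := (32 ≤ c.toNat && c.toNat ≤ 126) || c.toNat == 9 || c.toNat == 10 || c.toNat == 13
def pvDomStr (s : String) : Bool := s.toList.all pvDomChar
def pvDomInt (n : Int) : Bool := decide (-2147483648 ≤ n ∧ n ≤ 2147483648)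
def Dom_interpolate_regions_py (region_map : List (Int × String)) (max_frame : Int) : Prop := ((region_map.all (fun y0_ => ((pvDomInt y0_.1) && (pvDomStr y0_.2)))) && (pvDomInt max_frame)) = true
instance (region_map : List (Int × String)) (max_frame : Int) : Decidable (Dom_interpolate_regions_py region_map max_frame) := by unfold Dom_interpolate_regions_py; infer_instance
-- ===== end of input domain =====

-- B replaces A's per-frame rescan of the analyzed frames by a single segment-filling pass: faster (asymptotic, measured).
-- The dict argument is materialised with PySem.Dict.ofList (Python dict construction: later pair wins, key keeps first position).

-- ===== PORT A =====
-- inner loop 'for analyzed_frame in analyzed_frames: if … else break' with accumulator region_type;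
-- region_map[analyzed_frame] is getD with an unreachable default (the key comes from region_map.keys()).
def pvScanA (frames : List Int) (frame_idx : Int) (region_type : String)
    (rm : PySem.Dict Int String) : String :=
  match frames with
  | [] => region_type
  | f :: rest =>
      if f ≤ frame_idx then pvScanA rest frame_idx (PySem.Dict.getD rm f "poor") rm
      else region_type

def interpolate_regions_py (region_map : List (Int × String)) (max_frame : Int) : List (Int × String) :=
  if region_map = [] then []
  else
    let rm := PySem.Dict.ofList region_map
    let analyzed_frames := PySem.List.sorted rm.keys (fun x => x) false
    ((PySem.List.pyRange 0 (max_frame + 1) 1).foldl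
      (fun d frame_idx => d.insert frame_idx (pvScanA analyzed_frames frame_idx "poor" rm))
      PySem.Dict.empty).items

-- ===== PORT B =====
-- 'for f in range(a, b): result[f] = lbl'
def pvFillB (res : PySem.Dict Int String) (a b : Int) (lbl : String) : PySem.Dict Int String :=
  (PySem.List.pyRange a b 1).foldl (fun d f => d.insert f lbl) res

-- the main loop of B: pointer over the sorted analyzed frames, carrying (start, label)
def pvLoopB (ks : List Int) (rm : PySem.Dict Int String) (start : Int) (label : String)
    (max_frame : Int) (res : PySem.Dict Int String) : PySem.Dict Int String :=
  match ks with
  | [] => pvFillB res start (max_frame + 1) label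
  | k :: rest =>
      if k > max_frame then pvFillB res start (max_frame + 1) label
      else pvLoopB rest rm (max k 0) (PySem.Dict.getD rm k "poor") max_frame
             (pvFillB res start k label)

def interpolate_regions_py_alt (region_map : List (Int × String)) (max_frame : Int) : List (Int × String) :=
  if region_map = [] then []
  else
    let rm := PySem.Dict.ofList region_map
    (pvLoopB (PySem.List.sorted rm.keys (fun x => x) false) rm 0 "poor" max_frame
       PySem.Dict.empty).items

-- ===== PRECONDITION & SPEC =====
def Spec_interpolate_regions_py (region_map : List (Int × String)) (max_frame : Int) (out : List (Int × String)) : Prop := out = interpolate_regions_py_alt region_map max_frame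
instance (region_map : List (Int × String)) (max_frame : Int) (out : List (Int × String)) : Decidable (Spec_interpolate_regions_py region_map max_frame out) := by unfold Spec_interpolate_regions_py; infer_instance

-- ===== CLAIM (what is proved, stated in full; the proofs are below) =====
def Claim_equal_interpolate_regions_py : Prop := ∀ (region_map : List (Int × String)) (max_frame : Int), Dom_interpolate_regions_py region_map max_frame → Spec_interpolate_regions_py region_map max_frame (interpolate_regions_py region_map max_frame)

-- ===== LEMMAS AND PROOFS =====

-- filling [a, b) on a dict whose keys are exactly [0, a) appends the new pairs
lemma pvFillB_items (res : PySem.Dict Int String) (a b : Int) (lbl : String)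
    (hk : res.keys = PySem.List.pyRange 0 a 1) :
    (pvFillB res a b lbl).items
      = res.items ++ (PySem.List.pyRange a b 1).map (fun i => (i, lbl)) := by
  unfold pvFillB
  rw [PySem.Dict.items_foldl_insert_fresh]
  · intro f hf
    rw [PySem.Dict.contains_eq_decide_mem_keys, hk]
    simp only [PySem.List.mem_pyRange_one] at hf ⊢
    simp only [decide_eq_false_iff_not, not_and, not_lt]
    intro _; exact hf.1
  · simpa using PySem.List.nodup_pyRange_one a b

lemma pvFillB_keys (res : PySem.Dict Int String) (a b : Int) (lbl : String)
    (ha : 0 ≤ a) (hk : res.keys = PySem.List.pyRange 0 a 1) :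
    (pvFillB res a b lbl).keys = PySem.List.pyRange 0 (max a b) 1 := by
  have hmap : ∀ r : List Int, List.map (fun p => p.1) (List.map (fun i => (i, lbl)) r) = r := by
    intro r
    induction r with
    | nil => rfl
    | cons x xs ih => simpa using ih
  have h : (pvFillB res a b lbl).keys = res.keys ++ PySem.List.pyRange a b 1 := by
    show List.map (fun p => p.1) ((pvFillB res a b lbl).items) = _
    rw [pvFillB_items res a b lbl hk, List.map_append, hmap]
    rfl
  rw [h, hk]
  rcases le_or_gt a b with hab | hab
  · rw [max_eq_right hab, ← PySem.List.pyRange_one_append 0 a b ha hab]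
  · rw [max_eq_left hab.le, PySem.List.pyRange_one_eq_nil hab.le, List.append_nil]

-- main invariant: the loop of B extends res with exactly the pairs A would compute per frame
lemma pvLoopB_items (rm : PySem.Dict Int String) (max_frame : Int) (ks : List Int) :
    ∀ (start : Int) (label : String) (res : PySem.Dict Int String),
    0 ≤ start → (∀ k ∈ ks, start ≤ max k 0) → List.Pairwise (· ≤ ·) ks →
    res.keys = PySem.List.pyRange 0 start 1 →
    (pvLoopB ks rm start label max_frame res).items
      = res.items ++ (PySem.List.pyRange start (max_frame + 1) 1).map
          (fun i => (i, pvScanA ks i label rm)) := by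
  induction ks with
  | nil =>
      intro start label res _ _ _ hk
      unfold pvLoopB
      rw [pvFillB_items res _ _ _ hk]
      rfl
  | cons k rest ih =>
      intro start label res hs hmax hpair hk
      have hsk : start ≤ max k 0 := hmax k (by simp)
      unfold pvLoopB
      by_cases hkm : k > max_frame
      · rw [if_pos hkm, pvFillB_items res _ _ _ hk]
        congr 1
        apply List.map_congr_left
        intro i hi
        rw [PySem.List.mem_pyRange_one] at hi
        have : ¬ k ≤ i := by omega
        simp [pvScanA, this]
      · rw [if_neg hkm]
        have hkm' : k ≤ max_frame := by omega
        have hfill := pvFillB_items res start k label hk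
        have hfillk : (pvFillB res start k label).keys = PySem.List.pyRange 0 (max k 0) 1 := by
          rw [pvFillB_keys res start k label hs hk]
          congr 1
          rcases le_or_gt k 0 with h0 | h0
          · have : start = 0 := by omega
            omega
          · omega
        rw [ih (max k 0) (PySem.Dict.getD rm k "poor") _ (le_max_right k 0)
              (fun k' hk' => by
                have h1 : k ≤ k' := List.rel_of_pairwise_cons hpair hk'
                omega)
              (List.Pairwise.of_cons hpair) hfillk,
            hfill, List.append_assoc]
        congr 1
        have hsplit : PySem.List.pyRange start (max_frame + 1) 1
            = PySem.List.pyRange start k 1 ++ PySem.List.pyRange (max k 0) (max_frame + 1) 1 := by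
          rcases le_or_gt k 0 with h0 | h0
          · have hst : start = 0 := by omega
            subst hst
            rw [PySem.List.pyRange_one_eq_nil h0, List.nil_append]
            congr 1
            omega
          · have : max k 0 = k := by omega
            rw [this, PySem.List.pyRange_one_append start k (max_frame + 1) (by omega) (by omega)]
        rw [hsplit, List.map_append]
        congr 1
        · apply List.map_congr_left
          intro i hi
          rw [PySem.List.mem_pyRange_one] at hi
          have : ¬ k ≤ i := by omega
          simp [pvScanA, this]
        · apply List.map_congr_left
          intro i hi
          rw [PySem.List.mem_pyRange_one] at hi
          have : k ≤ i := by omega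
          simp [pvScanA, this]

-- A's foldl over fresh increasing frame indices from the empty dict is just the map
lemma interpA_items (rm : PySem.Dict Int String) (max_frame : Int) (ks : List Int) :
    ((PySem.List.pyRange 0 (max_frame + 1) 1).foldl
      (fun d frame_idx => d.insert frame_idx (pvScanA ks frame_idx "poor" rm))
      PySem.Dict.empty).items
    = (PySem.List.pyRange 0 (max_frame + 1) 1).map (fun i => (i, pvScanA ks i "poor" rm)) := by
  rw [PySem.Dict.items_foldl_insert_fresh]
  · rfl
  · intro a _; simp [PySem.Dict.contains_empty]
  · simpa using PySem.List.nodup_pyRange_one 0 (max_frame + 1)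

-- ===== VERDICT (by name: the statement is the Claim_ definition above) =====
theorem interpolate_regions_py_spec : Claim_equal_interpolate_regions_py := by
  intro region_map max_frame _
  unfold Spec_interpolate_regions_py interpolate_regions_py interpolate_regions_py_alt
  by_cases h : region_map = []
  · simp [h]
  · rw [if_neg h, if_neg h]
    set rm := PySem.Dict.ofList region_map
    set ks := PySem.List.sorted rm.keys (fun x => x) false with hks
    rw [interpA_items rm max_frame ks,
        pvLoopB_items rm max_frame ks 0 "poor" PySem.Dict.empty le_rfl
          (fun k _ => le_max_right k 0)
          (by simpa using PySem.List.sorted_pairwise rm.keys (fun x => x))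
          (by simp [PySem.Dict.keys_empty, PySem.List.pyRange_one_eq_nil])]
    rfl
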